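-- pv_equiv track=rewrite | github.com/wookkl/programmers-problemsolving | 크레인 인형뽑기 게임.py | solution
-- ===== SOURCE A (Python) =====
-- def solution(board, moves):
--     answer = 0
--     machine = [[] for _ in range(len(board))]
--     stack = []
--     while board:
--         for i, v in enumerate(board.pop()):
--             if v:
--                 machine[i].append(v)
--     for i in moves:
--         i -= 1
--         if machine[i]:
--             stack.append(machine[i].pop())
--             if len(stack) > 1 and stack[-1] == stack[-2]:
--                 stack.pop()
--                 stack.pop()
--                 answer += 2
--     return answer
-- ===== SOURCE B (Python) =====
-- def solution(board, moves):
--     answer = 0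
--     taken = [0] * len(board)   # per-column count of dolls already picked (top pointer)
--     stack = []
--     for m in moves:
--         c = m - 1
--         skip = taken[c]
--         for row in board:
--             if c < len(row) and row[c]:
--                 if skip:
--                     skip -= 1
--                 else:
--                     taken[c] += 1
--                     v = row[c]
--                     if stack and stack[-1] == v:
--                         stack.pop()
--                         answer += 2
--                     else:
--                         stack.append(v)
--                     break
--     return answer
-- ===== Notes on version B (the rewrite author's own statement) =====
-- stated objective: alternative
-- what changed: A empties the board to precompute all column stacks up front and then serves each move in O(1); B keeps the board intact and instead serves each move by scanning that column top-down with a per-column taken-counter (top pointer), so no machine table is ever built.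
-- outside the precondition, e.g. on solution([[3], [0, 3]], [0, 0]): A returns 0, B returns 2
import Mathlib
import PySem

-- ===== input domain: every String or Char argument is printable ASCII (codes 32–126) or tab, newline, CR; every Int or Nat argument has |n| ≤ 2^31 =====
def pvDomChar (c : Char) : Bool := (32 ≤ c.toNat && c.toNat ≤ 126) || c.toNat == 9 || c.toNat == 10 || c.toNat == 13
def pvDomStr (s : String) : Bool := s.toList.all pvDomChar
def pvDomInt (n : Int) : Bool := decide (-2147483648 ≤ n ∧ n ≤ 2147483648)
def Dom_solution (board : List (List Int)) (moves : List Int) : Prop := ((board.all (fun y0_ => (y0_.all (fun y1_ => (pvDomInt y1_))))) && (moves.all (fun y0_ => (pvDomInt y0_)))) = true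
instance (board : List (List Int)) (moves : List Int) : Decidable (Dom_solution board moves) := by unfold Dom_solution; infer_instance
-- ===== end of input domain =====

-- B replaces A's upfront O(n^2) column-stack table ("machine") by a per-move top-down scan of the
-- untouched board with a per-column taken-counter; equivalence is about the RETURN value only
-- (Python A empties `board` in place, B leaves it intact).

-- ===== PORT A =====
-- `for i, v in enumerate(row): if v: machine[i].append(v)` (enumerate indices are ≥ 0;
-- Pre_ keeps every i below len(machine), where Python would raise IndexError otherwise)
def stepRowA (machine : List (List Int)) (i : Nat) : List Int → List (List Int)
  | [] => machine
  | v :: vs =>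
      stepRowA (if v ≠ 0 then machine.set i (machine.getD i [] ++ [v]) else machine) (i + 1) vs

-- `machine = [[] for _ in range(len(board))]` then `while board: ... board.pop()`:
-- rows are processed from the LAST row upward, which foldr does (innermost application first)
def buildMachine (board : List (List Int)) : List (List Int) :=
  board.foldr (fun row machine => stepRowA machine 0 row) (List.replicate board.length [])

-- one iteration of A's `for i in moves` loop; the Python stack's top (stack[-1]) is the list head here
def stepA (st : List (List Int) × List Int × Int) (m : Int) : List (List Int) × List Int × Int :=
  let (machine, stack, answer) := st
  let i := m - 1
  let col := PySem.List.pyGetD machine i []          -- machine[i]; Pre_ keeps i in range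
  if col ≠ [] then
    let stack' := col.getLast?.getD 0 :: stack       -- stack.append(machine[i].pop())
    let machine' := PySem.List.pySetD machine i col.dropLast
    if 1 < stack'.length ∧ stack'.getD 0 0 = stack'.getD 1 0 then
      (machine', stack'.drop 2, answer + 2)          -- stack.pop(); stack.pop(); answer += 2
    else (machine', stack', answer)
  else st

def solution (board : List (List Int)) (moves : List Int) : Int :=
  (moves.foldl stepA (buildMachine board, ([] : List Int), (0 : Int))).2.2

-- ===== PORT B =====
-- B's inner `for row in board` scan: first nonzero cell of column c after skipping `skip` of them
def scanCol : List (List Int) → Int → Int → Option Int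
  | [], _, _ => none
  | row :: rest, c, skip =>
      if c < (row.length : Int) ∧ PySem.List.pyGetD row c 0 ≠ 0 then
        if skip ≠ 0 then scanCol rest c (skip - 1)
        else some (PySem.List.pyGetD row c 0)
      else scanCol rest c skip

-- one iteration of B's `for m in moves` loop (stack top at the list head, as in stepA)
def stepB (board : List (List Int)) (st : List Int × List Int × Int) (m : Int) :
    List Int × List Int × Int :=
  let (taken, stack, answer) := st
  let c := m - 1
  let skip := PySem.List.pyGetD taken c 0
  match scanCol board c skip with
  | none => st
  | some v =>
      let taken' := PySem.List.pySetD taken c (skip + 1)   -- taken[c] += 1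
      match stack with
      | t :: rest => if t = v then (taken', rest, answer + 2) else (taken', v :: t :: rest, answer)
      | [] => (taken', [v], answer)

def solution_alt (board : List (List Int)) (moves : List Int) : Int :=
  (moves.foldl (stepB board) (List.replicate board.length 0, ([] : List Int), (0 : Int))).2.2

-- ===== PRECONDITION & SPEC =====
-- Pre_ excludes exactly: rows longer than len(board) and moves outside 1-len(board)..len(board),
-- where A raises IndexError; and nonpositive moves on a non-rectangular board, where A returns a
-- value only through Python's negative-index wraparound reading each row from its right end — an
-- artefact of the implementation (see cites; on rectangular boards such moves stay inside Pre_).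
def Pre_solution (board : List (List Int)) (moves : List Int) : Prop :=
  (∀ row ∈ board, row.length ≤ board.length) ∧
  (∀ m ∈ moves, (1 ≤ m ∧ m ≤ (board.length : Int)) ∨
    (1 - (board.length : Int) ≤ m ∧ m ≤ 0 ∧ ∀ row ∈ board, row.length = board.length))
instance (board : List (List Int)) (moves : List Int) : Decidable (Pre_solution board moves) := by
  unfold Pre_solution; infer_instance

def pvWitness_solution : List (List Int) × List Int :=
  ([[0, 0, 0, 0, 0], [0, 0, 1, 0, 3], [0, 2, 5, 0, 1], [4, 2, 4, 4, 2], [3, 5, 1, 3, 1]],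
   [1, 5, 3, 5, 1, 2, 1, 4])

def Spec_solution (board : List (List Int)) (moves : List Int) (out : Int) : Prop :=
  out = solution_alt board moves
instance (board : List (List Int)) (moves : List Int) (out : Int) :
    Decidable (Spec_solution board moves out) := by unfold Spec_solution; infer_instance

-- ===== CLAIM (what is proved, stated in full; the proofs are below) =====
def Claim_equal_solution : Prop := ∀ (board : List (List Int)) (moves : List Int),
  Dom_solution board moves → Pre_solution board moves →
  Spec_solution board moves (solution board moves)

-- ===== LEMMAS AND PROOFS =====

-- the nonzero entries of column c, top row first (cells a short row does not have contribute nothing)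
def colC (board : List (List Int)) (c : Nat) : List Int :=
  board.filterMap (fun row => if c < row.length ∧ row.getD c 0 ≠ 0 then some (row.getD c 0) else none)

theorem scanCol_eq (board : List (List Int)) (c : Nat) :
    ∀ skip : Nat, scanCol board (c : Int) (skip : Int) = ((colC board c).drop skip).head? := by
  induction board with
  | nil => intro skip; simp [scanCol, colC]
  | cons row rest ih =>
    intro skip
    simp only [scanCol, colC, List.filterMap_cons, PySem.List.pyGetD_natCast]
    by_cases h : c < row.length ∧ row.getD c 0 ≠ 0
    · have hc : (c : Int) < (row.length : Int) ∧ row.getD c 0 ≠ 0 := ⟨by exact_mod_cast h.1, h.2⟩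
      rw [if_pos hc, if_pos h]
      cases skip with
      | zero => simp
      | succ k =>
        have hk : ((k + 1 : Nat) : Int) ≠ 0 := by omega
        rw [if_pos (by exact_mod_cast hk)]
        have : ((k + 1 : Nat) : Int) - 1 = (k : Int) := by omega
        rw [this, ih k]
        simp [colC]
    · have hc : ¬ ((c : Int) < (row.length : Int) ∧ row.getD c 0 ≠ 0) := by
        intro hcc; exact h ⟨by exact_mod_cast hcc.1, hcc.2⟩
      rw [if_neg hc, if_neg h, ih skip]
      simp [colC]

theorem pySetD_neg {α : Type} (xs : List α) (k : Nat) (v : α) (h1 : 0 < k) (h2 : k ≤ xs.length) :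
    PySem.List.pySetD xs (-(k : Int)) v = xs.set (xs.length - k) v := by
  unfold PySem.List.pySetD PySem.List.pySet?
  have hidx : PySem.List.pyIdx? xs.length (-(k : Int)) = some (xs.length - k) := by
    simp [PySem.List.pyIdx?]
    rw [if_neg (by omega), if_pos h2]
  rw [hidx]; rfl

theorem scanCol_eq_neg (n : Nat) (c : Int) (hc0 : c < 0) (hcn : 0 ≤ c + (n : Int)) :
    ∀ (board : List (List Int)), (∀ row ∈ board, row.length = n) → ∀ skip : Nat,
    scanCol board c (skip : Int) = ((colC board (c + n).toNat).drop skip).head? := by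
  intro board
  induction board with
  | nil => intro _ skip; simp [scanCol, colC]
  | cons row rest ih =>
    intro hrect skip
    have hrow : row.length = n := hrect row (List.mem_cons_self)
    have hval : PySem.List.pyGetD row c 0 = row.getD ((c + n).toNat) 0 := by
      have hk : c = -(((-c).toNat : Nat) : Int) := by omega
      conv_lhs => rw [hk]
      rw [PySem.List.pyGetD_neg_natCast row (-c).toNat 0 (by omega) (by omega)]
      rw [List.getD_eq_getElem row 0 (n := (c + (n : Int)).toNat) (hn := by omega)]
      congr 1
      omega
    have hcond : c < (row.length : Int) := by omega
    have hcolcond : (c + n).toNat < row.length ∧ row.getD ((c + n).toNat) 0 ≠ 0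
        ↔ row.getD ((c + n).toNat) 0 ≠ 0 := by
      constructor
      · exact fun h => h.2
      · exact fun h => ⟨by omega, h⟩
    simp only [scanCol, colC, List.filterMap_cons, hval]
    by_cases h : row.getD ((c + n).toNat) 0 ≠ 0
    · rw [if_pos ⟨hcond, h⟩, if_pos (hcolcond.mpr h)]
      cases skip with
      | zero => simp
      | succ k =>
        rw [if_pos (by exact_mod_cast (by omega : ((k + 1 : Nat) : Int) ≠ 0))]
        have h2 : ((k + 1 : Nat) : Int) - 1 = (k : Int) := by omega
        rw [h2, ih (fun r hr => hrect r (List.mem_cons_of_mem _ hr)) k]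
        simp [colC]
    · rw [if_neg (fun hh => h hh.2), if_neg (fun hh => h (hcolcond.mp hh))]
      rw [ih (fun r hr => hrect r (List.mem_cons_of_mem _ hr)) skip]
      simp [colC]

theorem stepRowA_length (vs : List Int) : ∀ (machine : List (List Int)) (i : Nat),
    (stepRowA machine i vs).length = machine.length := by
  induction vs with
  | nil => intro machine i; simp [stepRowA]
  | cons v vs ih =>
    intro machine i
    simp only [stepRowA]
    rw [ih]
    split_ifs <;> simp

theorem stepRowA_getD (vs : List Int) : ∀ (machine : List (List Int)) (i c : Nat),
    c < machine.length →
    (stepRowA machine i vs).getD c [] =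
      machine.getD c [] ++
        (if i ≤ c ∧ c - i < vs.length ∧ vs.getD (c - i) 0 ≠ 0 then [vs.getD (c - i) 0] else []) := by
  induction vs with
  | nil => intro machine i c _; simp [stepRowA]
  | cons v vs ih =>
    intro machine i c hc
    simp only [stepRowA]
    set M' := if v ≠ 0 then machine.set i (machine.getD i [] ++ [v]) else machine with hM'
    have hlen : M'.length = machine.length := by rw [hM']; split_ifs <;> simp
    rw [ih M' (i + 1) c (by rw [hlen]; exact hc)]
    have hgetD : ∀ (l : List (List Int)) (k : Nat), l.getD k [] = (l[k]?).getD [] := by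
      intro l k; simp [List.getD]
    by_cases hci : c = i
    · subst hci
      have h2 : ¬ (c + 1 ≤ c ∧ c - (c + 1) < vs.length ∧ vs.getD (c - (c + 1)) 0 ≠ 0) := by omega
      rw [if_neg h2, List.append_nil]
      have hcm : c - c = 0 := by omega
      by_cases hv : v ≠ 0
      · rw [hM', if_pos hv, hgetD, List.getElem?_set_self (by exact hc)]
        simp [hv]
      · rw [hM', if_neg hv]
        simp only [hcm]
        rw [not_not] at hv
        simp [hv]
    · have hM'c : M'.getD c [] = machine.getD c [] := by
        rw [hM']; split_ifs with hv
        · rw [hgetD, hgetD, List.getElem?_set_ne (by omega)]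
          rw [hgetD]
        · rfl
      rw [hM'c]
      by_cases hlt : c < i
      · have h1 : ¬ (i + 1 ≤ c ∧ c - (i + 1) < vs.length ∧ vs.getD (c - (i + 1)) 0 ≠ 0) := by omega
        have h2 : ¬ (i ≤ c ∧ c - i < (v :: vs).length ∧ (v :: vs).getD (c - i) 0 ≠ 0) := by omega
        rw [if_neg h1, if_neg h2]
      · have hgt : i < c := by omega
        have hsub : c - i = (c - (i + 1)) + 1 := by omega
        have hget : (v :: vs).getD (c - i) 0 = vs.getD (c - (i + 1)) 0 := by
          rw [hsub]; rfl
        have hiff : (i + 1 ≤ c ∧ c - (i + 1) < vs.length ∧ vs.getD (c - (i + 1)) 0 ≠ 0)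
            ↔ (i ≤ c ∧ c - i < (v :: vs).length ∧ (v :: vs).getD (c - i) 0 ≠ 0) := by
          rw [hget]; simp only [List.length_cons]; omega
        rw [if_congr hiff rfl rfl, hget]

theorem buildAux_length (board : List (List Int)) (M : List (List Int)) :
    (board.foldr (fun row machine => stepRowA machine 0 row) M).length = M.length := by
  induction board with
  | nil => rfl
  | cons row rest ih => simp only [List.foldr_cons]; rw [stepRowA_length, ih]

theorem buildAux_getD (board : List (List Int)) (M : List (List Int)) (c : Nat)
    (hrows : ∀ row ∈ board, row.length ≤ M.length) (hc : c < M.length) (hM : M.getD c [] = []) :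
    (board.foldr (fun row machine => stepRowA machine 0 row) M).getD c [] =
      (colC board c).reverse := by
  induction board with
  | nil => simpa [colC]
  | cons row rest ih =>
    simp only [List.foldr_cons]
    rw [stepRowA_getD row _ 0 c (by rw [buildAux_length]; exact hc)]
    rw [ih (fun r hr => hrows r (List.mem_cons_of_mem _ hr))]
    simp only [colC, List.filterMap_cons, Nat.sub_zero, Nat.zero_le, true_and]
    split_ifs with h
    · simp
    · simp

-- the simulation relation between A's machine state and B's taken counters
def SimRel (board : List (List Int)) (machine : List (List Int)) (taken : List Int) : Prop :=
  machine.length = board.length ∧ taken.length = board.length ∧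
  ∀ c : Nat, c < board.length → ∃ t : Nat, taken.getD c 0 = (t : Int) ∧
    machine.getD c [] = ((colC board c).drop t).reverse

theorem step_sim (board : List (List Int)) (machine : List (List Int)) (taken : List Int)
    (stack : List Int) (ans m : Int) (hR : SimRel board machine taken)
    (hm : (1 ≤ m ∧ m ≤ (board.length : Int)) ∨
      (1 - (board.length : Int) ≤ m ∧ m ≤ 0 ∧ ∀ row ∈ board, row.length = board.length)) :
    SimRel board (stepA (machine, stack, ans) m).1 (stepB board (taken, stack, ans) m).1 ∧
      (stepA (machine, stack, ans) m).2 = (stepB board (taken, stack, ans) m).2 := by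
  obtain ⟨hml, htl, hcols⟩ := hR
  obtain ⟨nc, hcn, Hskip, Hcol, Hscan, HsetA, HsetB⟩ :
      ∃ nc : Nat, nc < board.length ∧
        PySem.List.pyGetD taken (m - 1) 0 = taken.getD nc 0 ∧
        PySem.List.pyGetD machine (m - 1) [] = machine.getD nc [] ∧
        (∀ skip : Nat, scanCol board (m - 1) (skip : Int)
          = ((colC board nc).drop skip).head?) ∧
        (∀ x : List Int, PySem.List.pySetD machine (m - 1) x = machine.set nc x) ∧
        (∀ x : Int, PySem.List.pySetD taken (m - 1) x = taken.set nc x) := by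
    rcases hm with ⟨h1, h2⟩ | ⟨h1, h2, hrect⟩
    · have hceq : m - 1 = (((m - 1).toNat : Nat) : Int) := by omega
      refine ⟨(m - 1).toNat, by omega, ?_, ?_, ?_, ?_, ?_⟩
      · rw [hceq, PySem.List.pyGetD_natCast]; simp
      · rw [hceq, PySem.List.pyGetD_natCast]; simp
      · intro skip; rw [hceq]; exact scanCol_eq board _ skip
      · intro x; rw [hceq, PySem.List.pySetD_natCast]; simp
      · intro x; rw [hceq, PySem.List.pySetD_natCast]; simp
    · have hk : m - 1 = -((((1 - m).toNat : Nat)) : Int) := by omega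
      have hk1 : 0 < (1 - m).toNat := by omega
      have hk2 : (1 - m).toNat ≤ board.length := by omega
      refine ⟨board.length - (1 - m).toNat, by omega, ?_, ?_, ?_, ?_, ?_⟩
      · rw [hk, PySem.List.pyGetD_neg_natCast taken (1 - m).toNat 0 hk1 (by omega)]
        rw [List.getD_eq_getElem taken 0 (hn := by omega)]
        congr 1; omega
      · rw [hk, PySem.List.pyGetD_neg_natCast machine (1 - m).toNat [] hk1 (by omega)]
        rw [List.getD_eq_getElem machine [] (hn := by omega)]
        congr 1; omega
      · intro skip
        have hnc : (m - 1 + (board.length : Int)).toNat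
            = board.length - (1 - m).toNat := by omega
        rw [← hnc]
        exact scanCol_eq_neg board.length (m - 1) (by omega) (by omega) board hrect skip
      · intro x
        rw [hk, pySetD_neg machine (1 - m).toNat x hk1 (by omega)]
        congr 1; omega
      · intro x
        rw [hk, pySetD_neg taken (1 - m).toNat x hk1 (by omega)]
        congr 1; omega
  obtain ⟨t, hta, hmach⟩ := hcols nc hcn
  have hskip : PySem.List.pyGetD taken (m - 1) 0 = (t : Int) := by
    rw [Hskip]; exact hta
  have hscan : scanCol board (m - 1) (t : Int) = ((colC board nc).drop t).head? := Hscan t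
  have hcol : PySem.List.pyGetD machine (m - 1) [] = ((colC board nc).drop t).reverse := by
    rw [Hcol]; exact hmach
  cases hd : (colC board nc).drop t with
  | nil =>
    have hA : stepA (machine, stack, ans) m = (machine, stack, ans) := by
      simp only [stepA]; rw [hcol, hd]; simp
    have hB : stepB board (taken, stack, ans) m = (taken, stack, ans) := by
      simp only [stepB]; rw [hskip, hscan, hd]; rfl
    rw [hA, hB]; exact ⟨⟨hml, htl, hcols⟩, rfl⟩
  | cons v rest =>
    have hcolv : PySem.List.pyGetD machine (m - 1) [] = rest.reverse ++ [v] := by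
      rw [hcol, hd, List.reverse_cons]
    have hrel' : SimRel board (machine.set nc rest.reverse) (taken.set nc ((t : Int) + 1)) := by
      refine ⟨by simp [hml], by simp [htl], fun c' hc' => ?_⟩
      by_cases hcc : c' = nc
      · simp only [hcc]
        refine ⟨t + 1, ?_, ?_⟩
        · simp only [List.getD]
          rw [List.getElem?_set_self (by omega)]
          simp only [Option.getD_some]
          omega
        · simp only [List.getD]
          rw [List.getElem?_set_self (by omega)]
          have hdrop : (colC board nc).drop (t + 1) = rest := by
            have h2 := congrArg (List.drop 1) hd
            rw [List.drop_drop] at h2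
            simpa [Nat.add_comm] using h2
          rw [hdrop]; rfl
      · obtain ⟨t', h1, h2⟩ := hcols c' hc'
        refine ⟨t', ?_, ?_⟩
        · simpa only [List.getD, List.getElem?_set_ne (fun h => hcc h.symm)] using h1
        · simpa only [List.getD, List.getElem?_set_ne (fun h => hcc h.symm)] using h2
    have hsetA : PySem.List.pySetD machine (m - 1) ((rest.reverse ++ [v]).dropLast)
        = machine.set nc rest.reverse := by
      rw [HsetA, List.dropLast_concat]
    have hsetB : PySem.List.pySetD taken (m - 1) ((t : Int) + 1)
        = taken.set nc ((t : Int) + 1) := HsetB _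
    have hlast : (rest.reverse ++ [v]).getLast?.getD 0 = v := by
      rw [List.getLast?_concat]; rfl
    have hBv : ∀ s a, stepB board (taken, s, a) m
        = (let taken' := taken.set nc ((t : Int) + 1);
           match s with
           | tp :: rs => if tp = v then (taken', rs, a + 2) else (taken', v :: tp :: rs, a)
           | [] => (taken', [v], a)) := by
      intro s a
      simp only [stepB]
      rw [hskip, hscan, hd, hsetB]
      rfl
    match stack with
    | [] =>
      have hA : stepA (machine, [], ans) m = (machine.set nc rest.reverse, [v], ans) := by
        simp only [stepA]; rw [hcolv, hsetA, hlast]; simp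
      have hB : stepB board (taken, [], ans) m = (taken.set nc ((t : Int) + 1), [v], ans) := by
        rw [hBv]
      rw [hA, hB]
      exact ⟨hrel', rfl⟩
    | w :: ws =>
      by_cases hvw : w = v
      · have hA : stepA (machine, w :: ws, ans) m
            = (machine.set nc rest.reverse, ws, ans + 2) := by
          simp only [stepA]; rw [hcolv, hsetA, hlast]; simp [List.getD, hvw]
        have hB : stepB board (taken, w :: ws, ans) m
            = (taken.set nc ((t : Int) + 1), ws, ans + 2) := by
          rw [hBv]; simp [hvw]
        rw [hA, hB]
        exact ⟨hrel', rfl⟩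
      · have hvw' : ¬ v = w := fun h => hvw h.symm
        have hA : stepA (machine, w :: ws, ans) m
            = (machine.set nc rest.reverse, v :: w :: ws, ans) := by
          simp only [stepA]; rw [hcolv, hsetA, hlast]
          simp [List.getD, hvw']
        have hB : stepB board (taken, w :: ws, ans) m
            = (taken.set nc ((t : Int) + 1), v :: w :: ws, ans) := by
          rw [hBv]; simp [hvw]
        rw [hA, hB]
        exact ⟨hrel', rfl⟩

theorem loop_sim (board : List (List Int)) (moves : List Int) :
    ∀ (machine : List (List Int)) (taken : List Int) (stack : List Int) (ans : Int),
    SimRel board machine taken →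
    (∀ m ∈ moves, (1 ≤ m ∧ m ≤ (board.length : Int)) ∨
      (1 - (board.length : Int) ≤ m ∧ m ≤ 0 ∧ ∀ row ∈ board, row.length = board.length)) →
    (moves.foldl stepA (machine, stack, ans)).2 =
      (moves.foldl (stepB board) (taken, stack, ans)).2 := by
  induction moves with
  | nil => intro machine taken stack ans _ _; rfl
  | cons m rest ih =>
    intro machine taken stack ans hR hmv
    simp only [List.foldl_cons]
    obtain ⟨hR', hst⟩ := step_sim board machine taken stack ans m hR (hmv m (List.mem_cons_self))
    have hA : stepA (machine, stack, ans) m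
        = ((stepA (machine, stack, ans) m).1, (stepA (machine, stack, ans) m).2) := rfl
    have hB : stepB board (taken, stack, ans) m
        = ((stepB board (taken, stack, ans) m).1, (stepB board (taken, stack, ans) m).2) := rfl
    rw [hA, hB, hst]
    obtain ⟨s', a'⟩ := (stepB board (taken, stack, ans) m).2
    exact ih _ _ s' a' hR' (fun x hx => hmv x (List.mem_cons_of_mem _ hx))

-- ===== VERDICT (by name: the statement is the Claim_ definition above) =====
theorem solution_spec : Claim_equal_solution := by
  intro board moves _ hPre
  unfold Spec_solution solution solution_alt
  have hinit : SimRel board (buildMachine board) (List.replicate board.length 0) := by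
    refine ⟨?_, by simp, ?_⟩
    · unfold buildMachine; rw [buildAux_length]; simp
    · intro c hc
      refine ⟨0, by simp, ?_⟩
      unfold buildMachine
      rw [buildAux_getD board _ c (by simpa using hPre.1) (by simpa using hc)
        (by simp)]
      simp
  have := loop_sim board moves (buildMachine board) (List.replicate board.length 0) [] 0
    hinit hPre.2
  exact congrArg (fun p : List Int × Int => p.2) this
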